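-- pv_equiv track=rewrite | github.com/joeflack4/genonaut | genonaut/ontologies/tags/scripts/generate_hierarchy.py | analyze_tag_patterns
-- ===== SOURCE A (Python) =====
-- from typing import Dict, Set, Tuple, List
--
-- def analyze_tag_patterns(tags: List[str]) -> Dict[str, List[str]]:
--     """Analyze tags and suggest hierarchical relationships based on patterns.
--
--     Args:
--         tags: List of all tags to analyze
--
--     Returns:
--         Dictionary mapping parent categories to lists of children
--     """
--     patterns = {
--         'software_category': [],
--         'test_type': [],
--         'development': [],
--         'technical': []
--     }
--
--     # Define patterns for automatic categorization
--     software_keywords = ['api', 'sdk', 'library', 'framework', 'service']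
--     test_keywords = ['test', 'testing', 'integration', 'unit', 'e2e', 'selenium']
--     dev_keywords = ['dev', 'development', 'debug', 'staging', 'prod', 'production']
--
--     for tag in tags:
--         tag_lower = tag.lower()
--
--         # Check for software-related terms
--         if any(keyword in tag_lower for keyword in software_keywords):
--             patterns['software_category'].append(tag)
--
--         # Check for test-related terms
--         elif any(keyword in tag_lower for keyword in test_keywords):
--             patterns['test_type'].append(tag)
--
--         # Check for development-related terms
--         elif any(keyword in tag_lower for keyword in dev_keywords):
--             patterns['development'].append(tag)
--
--         else:
--             patterns['technical'].append(tag)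
--
--     # Remove empty categories
--     return {k: v for k, v in patterns.items() if v}
-- ===== SOURCE B (Python) =====
-- def analyze_tag_patterns(tags):
--     """Category-major re-implementation: scan the tags once per category in
--     priority order, tracking assigned indices; unassigned tags fall to 'technical'."""
--     categories = [
--         ('software_category', ['api', 'sdk', 'library', 'framework', 'service']),
--         ('test_type', ['test', 'testing', 'integration', 'unit', 'e2e', 'selenium']),
--         ('development', ['dev', 'development', 'debug', 'staging', 'prod', 'production']),
--     ]
--     assigned = set()
--     result = {}
--     for name, keywords in categories:
--         bucket = []
--         for i, tag in enumerate(tags):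
--             if i not in assigned and any(kw in tag.lower() for kw in keywords):
--                 bucket.append(tag)
--                 assigned.add(i)
--         if bucket:
--             result[name] = bucket
--     technical = [tag for i, tag in enumerate(tags) if i not in assigned]
--     if technical:
--         result['technical'] = technical
--     return result
-- ===== Notes on version B (the rewrite author's own statement) =====
-- stated objective: alternative
-- what changed: Replaces A's single tag-major loop with an elif cascade by a category-major sweep: one pass over the tags per category in priority order with a set of already-assigned indices, unassigned tags falling through to 'technical'.
import Mathlib
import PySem

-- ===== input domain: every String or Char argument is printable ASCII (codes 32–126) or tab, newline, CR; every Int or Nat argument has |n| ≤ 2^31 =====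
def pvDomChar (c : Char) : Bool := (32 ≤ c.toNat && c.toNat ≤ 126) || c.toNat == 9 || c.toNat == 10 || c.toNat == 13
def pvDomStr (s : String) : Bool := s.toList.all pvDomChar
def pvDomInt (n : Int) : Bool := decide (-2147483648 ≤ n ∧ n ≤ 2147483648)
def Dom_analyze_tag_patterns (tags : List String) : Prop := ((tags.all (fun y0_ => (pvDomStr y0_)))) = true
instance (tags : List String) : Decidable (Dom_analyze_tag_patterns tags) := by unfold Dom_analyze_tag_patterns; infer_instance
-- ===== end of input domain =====

-- B re-implements the per-tag elif cascade as a category-major sweep (one pass per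
-- category in priority order, tracking assigned indices); alternative decomposition, same cost.

-- ===== PORT A =====
def pvSwKw : List String := ["api", "sdk", "library", "framework", "service"]
def pvTestKw : List String := ["test", "testing", "integration", "unit", "e2e", "selenium"]
def pvDevKw : List String := ["dev", "development", "debug", "staging", "prod", "production"]

-- any(keyword in tag.lower() for keyword in kws)
def pvMatch (kws : List String) (tag : String) : Bool :=
  kws.any (fun kw => PySem.Str.isIn kw (PySem.Str.lower tag))

-- the body of A's single for-loop (the elif cascade appending to one of the four buckets)
def pvStepA (p : List String × List String × List String × List String) (tag : String) :
    List String × List String × List String × List String :=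
  if pvMatch pvSwKw tag then (p.1 ++ [tag], p.2.1, p.2.2.1, p.2.2.2)
  else if pvMatch pvTestKw tag then (p.1, p.2.1 ++ [tag], p.2.2.1, p.2.2.2)
  else if pvMatch pvDevKw tag then (p.1, p.2.1, p.2.2.1 ++ [tag], p.2.2.2)
  else (p.1, p.2.1, p.2.2.1, p.2.2.2 ++ [tag])

def analyze_tag_patterns (tags : List String) : List (String × List String) :=
  let p := tags.foldl pvStepA ([], [], [], [])
  ([("software_category", p.1), ("test_type", p.2.1), ("development", p.2.2.1),
    ("technical", p.2.2.2)]).filter (fun kv => !kv.2.isEmpty)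

-- ===== PORT B =====
-- inner loop body: 'if i not in assigned and any(kw in tag.lower() for kw in keywords)'
def pvInnerStep (kws : List String) (q : PySem.Set Int × List String) (it : Int × String) :
    PySem.Set Int × List String :=
  if !(PySem.Set.contains q.1 it.1) && pvMatch kws it.2 then
    (PySem.Set.add q.1 it.1, q.2 ++ [it.2])
  else q

def analyze_tag_patterns_alt (tags : List String) : List (String × List String) :=
  let categories : List (String × List String) :=
    [("software_category", pvSwKw), ("test_type", pvTestKw), ("development", pvDevKw)]
  let st := categories.foldl
    (fun (st : PySem.Set Int × List (String × List String)) cat =>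
      let q := (PySem.List.enumerate tags 0).foldl (pvInnerStep cat.2) (st.1, [])
      (q.1, if q.2.isEmpty then st.2 else st.2 ++ [(cat.1, q.2)]))
    (PySem.Set.empty, [])
  let technical := (PySem.List.enumerate tags 0).filterMap
    (fun it => if PySem.Set.contains st.1 it.1 then none else some it.2)
  if technical.isEmpty then st.2 else st.2 ++ [("technical", technical)]

-- ===== PRECONDITION & SPEC =====
def Spec_analyze_tag_patterns (tags : List String) (out : List (String × List String)) : Prop := out = analyze_tag_patterns_alt tags
instance (tags : List String) (out : List (String × List String)) : Decidable (Spec_analyze_tag_patterns tags out) := by unfold Spec_analyze_tag_patterns; infer_instance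

-- ===== CLAIM (what is proved, stated in full; the proofs are below) =====
def Claim_equal_analyze_tag_patterns : Prop := ∀ (tags : List String), Dom_analyze_tag_patterns tags → Spec_analyze_tag_patterns tags (analyze_tag_patterns tags)

-- ===== LEMMAS AND PROOFS =====

lemma pvContains_add (S : PySem.Set Int) (x y : Int) :
    PySem.Set.contains (PySem.Set.add S x) y = (PySem.Set.contains S y || y == x) := by
  have h1 := PySem.Set.contains_iff (PySem.Set.add S x) y
  have h2 := PySem.Set.contains_iff S y
  have h3 := PySem.Set.mem_add S x y
  rw [Bool.eq_iff_iff, h1, h3]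
  constructor
  · rintro (h | h)
    · rw [h2.mpr h]; simp
    · rw [beq_iff_eq.mpr h, Bool.or_true]
  · intro h
    rcases Bool.or_eq_true_iff.mp h with h | h
    · exact Or.inl (h2.mp h)
    · exact Or.inr (beq_iff_eq.mp h)

-- characterization of A's loop: the four buckets are filters of the tag list
lemma pvA_fold (tags : List String) : ∀ (a b c d : List String),
    tags.foldl pvStepA (a, b, c, d) =
      (a ++ tags.filter (fun t => pvMatch pvSwKw t),
       b ++ tags.filter (fun t => !pvMatch pvSwKw t && pvMatch pvTestKw t),
       c ++ tags.filter (fun t => !pvMatch pvSwKw t && (!pvMatch pvTestKw t && pvMatch pvDevKw t)),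
       d ++ tags.filter (fun t => !pvMatch pvSwKw t && (!pvMatch pvTestKw t && !pvMatch pvDevKw t))) := by
  induction tags with
  | nil => simp
  | cons t rest ih =>
    intro a b c d
    simp only [List.foldl_cons, List.filter_cons]
    cases h0 : pvMatch pvSwKw t <;> cases h1 : pvMatch pvTestKw t <;> cases h2 : pvMatch pvDevKw t <;>
      simp [pvStepA, h0, h1, h2, ih, List.append_assoc]

-- characterization of B's inner pass over enumerate(tags): given that membership of an
-- index in the assigned set is determined by the predicate P on its tag, the bucket is a
-- filter, the new set is P ∨ match, and unrelated indices are untouched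
lemma pvInner_spec (kws : List String) (P : String → Bool) :
    ∀ (l : List (Int × String)) (S : PySem.Set Int) (acc : List String),
    (∀ p ∈ l, PySem.Set.contains S p.1 = P p.2) →
    (l.map (fun p => p.1)).Nodup →
    (l.foldl (pvInnerStep kws) (S, acc)).2
        = acc ++ (l.filter (fun p => !P p.2 && pvMatch kws p.2)).map (fun p => p.2)
    ∧ (∀ p ∈ l, PySem.Set.contains (l.foldl (pvInnerStep kws) (S, acc)).1 p.1 = (P p.2 || pvMatch kws p.2))
    ∧ (∀ i : Int, i ∉ l.map (fun p => p.1) →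
        PySem.Set.contains (l.foldl (pvInnerStep kws) (S, acc)).1 i = PySem.Set.contains S i) := by
  intro l
  induction l with
  | nil => intro S acc _ _; simp
  | cons p rest ih =>
    obtain ⟨i, t⟩ := p
    intro S acc hS hnd
    have hhead : PySem.Set.contains S i = P t := hS (i, t) (by simp)
    have hrestnd : (rest.map (fun p => p.1)).Nodup := (List.nodup_cons.mp (by simpa using hnd)).2
    have hinotin : i ∉ rest.map (fun p => p.1) := (List.nodup_cons.mp (by simpa using hnd)).1
    cases hP : P t with
    | true =>
      have hcond : (!(PySem.Set.contains S i) && pvMatch kws t) = false := by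
        rw [hhead, hP]; rfl
      have hstep : pvInnerStep kws (S, acc) (i, t) = (S, acc) := by
        simp only [pvInnerStep]
        rw [hcond]
        simp
      obtain ⟨ih1, ih2, ih3⟩ := ih S acc (fun p hp => hS p (by simp [hp])) hrestnd
      refine ⟨?_, ?_, ?_⟩
      · simp only [List.foldl_cons, hstep, ih1, List.filter_cons]
        simp [hP]
      · intro p hp
        rcases List.mem_cons.mp hp with h | h
        · cases h
          simp only [List.foldl_cons, hstep]
          rw [ih3 i hinotin, hhead, hP, Bool.true_or]
        · simpa only [List.foldl_cons, hstep] using ih2 p h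
      · intro j hj
        simp only [List.foldl_cons, hstep]
        exact ih3 j (by simp at hj; simp [hj])
    | false =>
      cases hM : pvMatch kws t with
      | false =>
        have hcond : (!(PySem.Set.contains S i) && pvMatch kws t) = false := by
          rw [hhead, hP, hM]; rfl
        have hstep : pvInnerStep kws (S, acc) (i, t) = (S, acc) := by
          simp only [pvInnerStep]
          rw [hcond]
          simp
        obtain ⟨ih1, ih2, ih3⟩ := ih S acc (fun p hp => hS p (by simp [hp])) hrestnd
        refine ⟨?_, ?_, ?_⟩
        · simp only [List.foldl_cons, hstep, ih1, List.filter_cons]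
          simp [hP, hM]
        · intro p hp
          rcases List.mem_cons.mp hp with h | h
          · cases h
            simp only [List.foldl_cons, hstep]
            rw [ih3 i hinotin, hhead, hP, hM]
            rfl
          · simpa only [List.foldl_cons, hstep] using ih2 p h
        · intro j hj
          simp only [List.foldl_cons, hstep]
          exact ih3 j (by simp at hj; simp [hj])
      | true =>
        have hcond : (!(PySem.Set.contains S i) && pvMatch kws t) = true := by
          rw [hhead, hP, hM]; rfl
        have hstep : pvInnerStep kws (S, acc) (i, t) = (PySem.Set.add S i, acc ++ [t]) := by
          simp only [pvInnerStep]
          rw [hcond]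
          simp
        have hS' : ∀ p ∈ rest, PySem.Set.contains (PySem.Set.add S i) p.1 = P p.2 := by
          intro p hp
          have hne : p.1 ≠ i := by
            intro h; exact absurd (h ▸ List.mem_map_of_mem (f := fun p => p.1) hp) hinotin
          rw [pvContains_add, hS p (by simp [hp])]
          simp [hne]
        obtain ⟨ih1, ih2, ih3⟩ := ih (PySem.Set.add S i) (acc ++ [t]) hS' hrestnd
        refine ⟨?_, ?_, ?_⟩
        · simp only [List.foldl_cons, hstep, ih1, List.filter_cons]
          simp [hP, hM, List.append_assoc]
        · intro p hp
          rcases List.mem_cons.mp hp with h | h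
          · cases h
            simp only [List.foldl_cons, hstep]
            rw [ih3 i hinotin, pvContains_add, hP, hM]
            simp
          · simpa only [List.foldl_cons, hstep] using ih2 p h
        · intro j hj
          have hji : j ≠ i := by simp at hj; exact fun h => absurd h (by simp [hj.1])
          have hjr : j ∉ rest.map (fun p => p.1) := by simp at hj ⊢; exact hj.2
          simp only [List.foldl_cons, hstep]
          rw [ih3 j hjr, pvContains_add]
          simp [hji]
        -- j ≠ i from hj
  -- end induction

lemma pvEnum_nodup (tags : List String) :
    ((PySem.List.enumerate tags 0).map (fun p => p.1)).Nodup := by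
  rw [PySem.List.map_fst_enumerate]
  exact PySem.List.nodup_pyRange_one 0 (0 + tags.length)

-- a filtered projection of enumerate(tags) where the predicate reads only the tag
lemma pvBucket_eq (q : String → Bool) :
    ∀ (tags : List String) (s : Int),
    ((PySem.List.enumerate tags s).filter (fun p => q p.2)).map (fun p => p.2) = tags.filter q := by
  intro tags
  induction tags with
  | nil => intro s; simp
  | cons t rest ih =>
    intro s
    rw [PySem.List.enumerate_cons, List.filter_cons, List.filter_cons]
    cases h : q t <;> simp [ih (s + 1)]

-- the trailing comprehension: unassigned tags, where membership is determined by P3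
lemma pvTechnical_eq (T : PySem.Set Int) (P3 : String → Bool) :
    ∀ (tags : List String) (s : Int),
    (∀ p ∈ PySem.List.enumerate tags s, PySem.Set.contains T p.1 = P3 p.2) →
    (PySem.List.enumerate tags s).filterMap
        (fun it => if PySem.Set.contains T it.1 then none else some it.2)
      = tags.filter (fun t => !P3 t) := by
  intro tags
  induction tags with
  | nil => intro s _; simp
  | cons t rest ih =>
    intro s hT
    have hh : PySem.Set.contains T s = P3 t := hT (s, t) (by rw [PySem.List.enumerate_cons]; simp)
    rw [PySem.List.enumerate_cons, List.filterMap_cons, List.filter_cons]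
    have hr := ih (s + 1) (fun p hp => hT p (by rw [PySem.List.enumerate_cons]; simp [hp]))
    simp only [show T.contains (s, t).1 = P3 t from hh]
    simp at hr
    cases hp : P3 t <;> simp_all

lemma pvContains_empty (i : Int) : PySem.Set.contains (PySem.Set.empty : PySem.Set Int) i = false := rfl

-- abbreviations for the "already assigned" predicates after each category pass
def pvP1 (t : String) : Bool := pvMatch pvSwKw t
def pvP2 (t : String) : Bool := pvP1 t || pvMatch pvTestKw t
def pvP3 (t : String) : Bool := pvP2 t || pvMatch pvDevKw t

-- ===== VERDICT (by name: the statement is the Claim_ definition above) =====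
theorem analyze_tag_patterns_spec : Claim_equal_analyze_tag_patterns := by
  intro tags _
  unfold Spec_analyze_tag_patterns
  have hA : analyze_tag_patterns tags =
      ([("software_category", tags.filter (fun t => pvMatch pvSwKw t)),
        ("test_type", tags.filter (fun t => !pvMatch pvSwKw t && pvMatch pvTestKw t)),
        ("development", tags.filter (fun t => !pvMatch pvSwKw t && (!pvMatch pvTestKw t && pvMatch pvDevKw t))),
        ("technical", tags.filter (fun t => !pvMatch pvSwKw t && (!pvMatch pvTestKw t && !pvMatch pvDevKw t)))]).filter
        (fun kv => !kv.2.isEmpty) := by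
    unfold analyze_tag_patterns
    rw [pvA_fold tags [] [] [] []]
    simp
  have hnd := pvEnum_nodup tags
  have h0 : ∀ p ∈ PySem.List.enumerate tags 0,
      PySem.Set.contains (PySem.Set.empty : PySem.Set Int) p.1 = (fun _ => false) p.2 :=
    fun p _ => pvContains_empty p.1
  obtain ⟨hb0, hs0, -⟩ := pvInner_spec pvSwKw (fun _ => false)
    (PySem.List.enumerate tags 0) PySem.Set.empty [] h0 hnd
  have hs0' : ∀ p ∈ PySem.List.enumerate tags 0,
      PySem.Set.contains ((PySem.List.enumerate tags 0).foldl (pvInnerStep pvSwKw)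
        (PySem.Set.empty, [])).1 p.1 = pvP1 p.2 := by
    intro p hp; rw [hs0 p hp]; simp [pvP1]
  obtain ⟨hb1, hs1, -⟩ := pvInner_spec pvTestKw pvP1 (PySem.List.enumerate tags 0)
    ((PySem.List.enumerate tags 0).foldl (pvInnerStep pvSwKw) (PySem.Set.empty, [])).1 [] hs0' hnd
  have hs1' : ∀ p ∈ PySem.List.enumerate tags 0,
      PySem.Set.contains ((PySem.List.enumerate tags 0).foldl (pvInnerStep pvTestKw)
        (((PySem.List.enumerate tags 0).foldl (pvInnerStep pvSwKw) (PySem.Set.empty, [])).1, [])).1 p.1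
        = pvP2 p.2 := by
    intro p hp; rw [hs1 p hp]; simp [pvP2]
  obtain ⟨hb2, hs2, -⟩ := pvInner_spec pvDevKw pvP2 (PySem.List.enumerate tags 0)
    ((PySem.List.enumerate tags 0).foldl (pvInnerStep pvTestKw)
      (((PySem.List.enumerate tags 0).foldl (pvInnerStep pvSwKw) (PySem.Set.empty, [])).1, [])).1 [] hs1' hnd
  have hs2' : ∀ p ∈ PySem.List.enumerate tags 0,
      PySem.Set.contains ((PySem.List.enumerate tags 0).foldl (pvInnerStep pvDevKw)
        (((PySem.List.enumerate tags 0).foldl (pvInnerStep pvTestKw)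
          (((PySem.List.enumerate tags 0).foldl (pvInnerStep pvSwKw) (PySem.Set.empty, [])).1, [])).1, [])).1 p.1
        = pvP3 p.2 := by
    intro p hp; rw [hs2 p hp]; simp [pvP3]
  have htech := pvTechnical_eq _ pvP3 tags 0 hs2'
  have e0 : ((PySem.List.enumerate tags 0).foldl (pvInnerStep pvSwKw) (PySem.Set.empty, [])).2
      = tags.filter (fun t => pvMatch pvSwKw t) := by
    rw [hb0]
    simpa using pvBucket_eq (fun t => pvMatch pvSwKw t) tags 0
  have e1 : ((PySem.List.enumerate tags 0).foldl (pvInnerStep pvTestKw)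
      (((PySem.List.enumerate tags 0).foldl (pvInnerStep pvSwKw) (PySem.Set.empty, [])).1, [])).2
      = tags.filter (fun t => !pvMatch pvSwKw t && pvMatch pvTestKw t) := by
    rw [hb1]
    simpa [pvP1] using pvBucket_eq (fun t => !pvP1 t && pvMatch pvTestKw t) tags 0
  have e2 : ((PySem.List.enumerate tags 0).foldl (pvInnerStep pvDevKw)
      (((PySem.List.enumerate tags 0).foldl (pvInnerStep pvTestKw)
        (((PySem.List.enumerate tags 0).foldl (pvInnerStep pvSwKw) (PySem.Set.empty, [])).1, [])).1, [])).2
      = tags.filter (fun t => !pvMatch pvSwKw t && (!pvMatch pvTestKw t && pvMatch pvDevKw t)) := by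
    rw [hb2]
    simpa [pvP2, pvP1, Bool.not_or, Bool.and_assoc] using
      pvBucket_eq (fun t => !pvP2 t && pvMatch pvDevKw t) tags 0
  have e3 : (PySem.List.enumerate tags 0).filterMap
      (fun it => if PySem.Set.contains ((PySem.List.enumerate tags 0).foldl (pvInnerStep pvDevKw)
        (((PySem.List.enumerate tags 0).foldl (pvInnerStep pvTestKw)
          (((PySem.List.enumerate tags 0).foldl (pvInnerStep pvSwKw) (PySem.Set.empty, [])).1, [])).1, [])).1 it.1
        then none else some it.2)
      = tags.filter (fun t => !pvMatch pvSwKw t && (!pvMatch pvTestKw t && !pvMatch pvDevKw t)) := by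
    rw [htech]
    apply List.filter_congr
    intro x _
    simp [pvP3, pvP2, pvP1]
    cases pvMatch pvSwKw x <;> cases pvMatch pvTestKw x <;> cases pvMatch pvDevKw x <;> rfl
  rw [hA]
  unfold analyze_tag_patterns_alt
  simp only [List.foldl_cons, List.foldl_nil]
  rw [e0, e1, e2, e3]
  cases h0 : (tags.filter (fun t => pvMatch pvSwKw t)).isEmpty <;>
  cases h1 : (tags.filter (fun t => !pvMatch pvSwKw t && pvMatch pvTestKw t)).isEmpty <;>
  cases h2 : (tags.filter (fun t => !pvMatch pvSwKw t && (!pvMatch pvTestKw t && pvMatch pvDevKw t))).isEmpty <;>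
  cases h3 : (tags.filter (fun t => !pvMatch pvSwKw t && (!pvMatch pvTestKw t && !pvMatch pvDevKw t))).isEmpty <;>
  simp [List.filter, h0, h1, h2, h3]
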